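-- pv_equiv track=rewrite | github.com/daniel-reich/ubiquitous-fiesta | LtwvpqeRY2gQcMQyy_3.py | sig_figs
-- ===== SOURCE A (Python) =====
-- def sig_figs(num):
--     first = -1
--     s = ''.join([x for x in num if x.isdigit()])
--     last = len(s) - 1
--     for i,x in enumerate(s):
--         if x != '0' and first < 0 and x.isdigit():
--             first = i
--         if x != '0' and '.' not in num:
--             last = i
--     if first < 0:
--         return 0
--     return last - first + 1
-- ===== SOURCE B (Python) =====
-- def sig_figs(num):
--     started = False
--     count = 0
--     zeros = 0
--     for x in num:
--         if x.isdigit():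
--             if x != '0':
--                 started = True
--                 count += zeros + 1
--                 zeros = 0
--             elif started:
--                 zeros += 1
--     return count + zeros if '.' in num else count
-- ===== Notes on version B (the rewrite author's own statement) =====
-- stated objective: alternative
-- what changed: Replaces A's build-digit-string-then-track-first/last-index scan with a single pass directly over the input maintaining a running significant-digit count and a pending-zeros accumulator that is absorbed at each nonzero digit; no intermediate string or indices.
import Mathlib
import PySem

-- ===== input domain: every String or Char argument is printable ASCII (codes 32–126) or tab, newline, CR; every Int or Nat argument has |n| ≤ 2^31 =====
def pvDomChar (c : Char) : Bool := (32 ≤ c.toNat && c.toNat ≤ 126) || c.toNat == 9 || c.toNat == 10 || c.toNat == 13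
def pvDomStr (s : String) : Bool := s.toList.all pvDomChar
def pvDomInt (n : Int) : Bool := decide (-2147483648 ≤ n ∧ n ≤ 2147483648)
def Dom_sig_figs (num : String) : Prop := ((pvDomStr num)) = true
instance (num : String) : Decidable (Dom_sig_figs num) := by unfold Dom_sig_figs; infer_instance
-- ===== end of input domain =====

-- B counts significant figures in ONE pass over the input with a running count and a
-- pending-zeros accumulator, instead of A's digit-string + first/last index tracking;
-- same value on every input (alternative decomposition, not claimed faster).

-- ===== PORT A =====
-- the 'for i,x in enumerate(s)' loop, carrying the (first, last) state
def sigLoop (num : String) : List (Int × Char) → Int × Int → Int × Int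
  | [], st => st
  | (i, x) :: rest, (first, last) =>
    let first' := if x ≠ '0' ∧ first < 0 ∧ PySem.Chars.isdigit x = true then i else first
    let last' := if x ≠ '0' ∧ '.' ∉ num.toList then i else last
    sigLoop num rest (first', last')

def sig_figs (num : String) : Int :=
  let s := num.toList.filter PySem.Chars.isdigit
  let last : Int := (s.length : Int) - 1
  let r := sigLoop num (PySem.List.enumerate s) (-1, last)
  if r.1 < 0 then 0 else r.2 - r.1 + 1

-- ===== PORT B =====
-- the 'for x in num' loop carrying the (started, count, zeros) state
def altLoop : List Char → Bool × Int × Int → Bool × Int × Int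
  | [], st => st
  | x :: rest, (started, count, zeros) =>
    if PySem.Chars.isdigit x then
      if x ≠ '0' then altLoop rest (true, count + zeros + 1, 0)
      else if started then altLoop rest (started, count, zeros + 1)
      else altLoop rest (started, count, zeros)
    else altLoop rest (started, count, zeros)

def sig_figs_alt (num : String) : Int :=
  let r := altLoop num.toList (false, 0, 0)
  if '.' ∈ num.toList then r.2.1 + r.2.2 else r.2.1

-- ===== PRECONDITION & SPEC =====
def Spec_sig_figs (num : String) (out : Int) : Prop := out = sig_figs_alt num
instance (num : String) (out : Int) : Decidable (Spec_sig_figs num out) := by unfold Spec_sig_figs; infer_instance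

-- ===== CLAIM (what is proved, stated in full; the proofs are below) =====
def Claim_equal_sig_figs : Prop := ∀ (num : String), Dom_sig_figs num → Spec_sig_figs num (sig_figs num)

-- ===== LEMMAS AND PROOFS =====

-- A's loop: once first ≥ 0 it never changes; last ends at the index of the last non-'0' (if '.' ∉ num)
theorem sigLoop_found (num : String) (l : List Char) :
    ∀ (n f last : Int), 0 ≤ f →
    sigLoop num (PySem.List.enumerate l n) (f, last) =
      (f, if '.' ∉ num.toList ∧ l.reverse.dropWhile (· == '0') ≠ [] then
            n + ((l.reverse.dropWhile (· == '0')).length : Int) - 1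
          else last) := by
  induction l with
  | nil => intro n f last hf; simp [PySem.List.enumerate, sigLoop]
  | cons x rest ih =>
    intro n f last hf
    rw [PySem.List.enumerate_cons]
    simp only [sigLoop]
    have hnot : ¬ (x ≠ '0' ∧ f < 0 ∧ PySem.Chars.isdigit x = true) := by
      rintro ⟨-, h, -⟩; omega
    rw [if_neg hnot, ih (n + 1) f _ hf, List.reverse_cons]
    by_cases hdot : '.' ∉ num.toList
    · by_cases hrd : rest.reverse.dropWhile (· == '0') = []
      · by_cases hx0 : x = '0'
        · subst hx0
          have hx : (rest.reverse ++ [('0' : Char)]).dropWhile (· == '0') = [] := by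
            rw [List.dropWhile_append, hrd]; simp [List.dropWhile]
          simp [hrd, hx, hdot]
        · have hb : (x == '0') = false := beq_eq_false_iff_ne.mpr hx0
          have hx : (rest.reverse ++ [x]).dropWhile (· == '0') = [x] := by
            rw [List.dropWhile_append, hrd]; simp [List.dropWhile, hb]
          simp [hrd, hx, hdot, hx0]
      · have hx : (rest.reverse ++ [x]).dropWhile (· == '0')
            = rest.reverse.dropWhile (· == '0') ++ [x] := by
          rw [List.dropWhile_append]; simp [List.isEmpty_iff, hrd]
        have hne : rest.reverse.dropWhile (· == '0') ++ [x] ≠ [] := by simp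
        simp only [hx, hrd, hdot, hne, ne_eq, not_false_eq_true, and_true, true_and,
          if_true, List.length_append, List.length_singleton]
        push_cast; ring_nf
    · simp [hdot]

theorem sigLoop_search (num : String) (l : List Char) :
    ∀ (n last : Int), 0 ≤ n → (∀ x ∈ l, PySem.Chars.isdigit x = true) →
    sigLoop num (PySem.List.enumerate l n) (-1, last) =
      ( if l.dropWhile (· == '0') = [] then -1
        else n + (l.length : Int) - ((l.dropWhile (· == '0')).length : Int),
        if '.' ∉ num.toList ∧ l.reverse.dropWhile (· == '0') ≠ [] then
          n + ((l.reverse.dropWhile (· == '0')).length : Int) - 1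
        else last ) := by
  induction l with
  | nil => intro n last hn hd; simp [PySem.List.enumerate, sigLoop]
  | cons x rest ih =>
    intro n last hn hd
    rw [PySem.List.enumerate_cons]
    simp only [sigLoop]
    by_cases hx0 : x = '0'
    · subst hx0
      rw [if_neg (by rintro ⟨h, -⟩; exact h rfl), if_neg (by rintro ⟨h, -⟩; exact h rfl)]
      rw [ih (n + 1) last (by omega) (fun y hy => hd y (List.mem_cons_of_mem _ hy)),
        List.reverse_cons]
      have hdw : (('0' : Char) :: rest).dropWhile (· == '0') = rest.dropWhile (· == '0') := by
        simp [List.dropWhile]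
      rw [hdw]
      by_cases hrd : rest.reverse.dropWhile (· == '0') = []
      · have hx : (rest.reverse ++ [('0' : Char)]).dropWhile (· == '0') = [] := by
          rw [List.dropWhile_append, hrd]; simp [List.dropWhile]
        have hre : rest.dropWhile (· == '0') = [] := by
          rw [List.dropWhile_eq_nil_iff] at hrd ⊢
          intro y hy; exact hrd y (by simpa using hy)
        simp [hx, hrd, hre]
      · have hx : (rest.reverse ++ [('0' : Char)]).dropWhile (· == '0')
            = rest.reverse.dropWhile (· == '0') ++ [('0' : Char)] := by
          rw [List.dropWhile_append]; simp [List.isEmpty_iff, hrd]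
        have hrne : rest.dropWhile (· == '0') ≠ [] := by
          intro h
          apply hrd
          rw [List.dropWhile_eq_nil_iff] at h ⊢
          intro y hy; exact h y (by simpa using hy)
        have hne : rest.reverse.dropWhile (· == '0') ++ [('0' : Char)] ≠ [] := by simp
        simp only [hx, hrd, hrne, hne, ne_eq, not_false_eq_true, and_true, if_false,
          if_neg hrne, List.length_append, List.length_singleton, List.length_cons]
        rw [Prod.mk.injEq]; refine ⟨?_, ?_⟩
        · push_cast; omega
        · by_cases hdot : '.' ∉ num.toList <;> simp [hdot] <;> push_cast <;> ring_nf
    · have hdig : PySem.Chars.isdigit x = true := hd x (List.mem_cons_self ..)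
      rw [if_pos ⟨hx0, by norm_num, hdig⟩,
        sigLoop_found num rest (n + 1) n _ hn, List.reverse_cons]
      have hdw : (x :: rest).dropWhile (· == '0') = x :: rest := by
        simp [List.dropWhile, beq_eq_false_iff_ne.mpr hx0]
      rw [hdw]
      have hdne : x :: rest ≠ [] := by simp
      by_cases hrd : rest.reverse.dropWhile (· == '0') = []
      · have hxx : (rest.reverse ++ [x]).dropWhile (· == '0') = [x] := by
          rw [List.dropWhile_append, hrd]
          simp [List.dropWhile, beq_eq_false_iff_ne.mpr hx0]
        simp only [hxx, hrd, hdne, ne_eq, not_false_eq_true, if_false,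
          List.length_singleton, List.length_cons]
        rw [Prod.mk.injEq]; refine ⟨?_, ?_⟩
        · push_cast; ring_nf
        · by_cases hdot : '.' ∉ num.toList <;> simp [hdot, hx0] <;> omega
      · have hxx : (rest.reverse ++ [x]).dropWhile (· == '0')
            = rest.reverse.dropWhile (· == '0') ++ [x] := by
          rw [List.dropWhile_append]; simp [List.isEmpty_iff, hrd]
        have hne : rest.reverse.dropWhile (· == '0') ++ [x] ≠ [] := by simp
        simp only [hxx, hrd, hdne, hne, ne_eq, not_false_eq_true, if_false,
          List.length_append, List.length_singleton, List.length_cons]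
        rw [Prod.mk.injEq]; refine ⟨?_, ?_⟩
        · push_cast; ring_nf
        · by_cases hdot : '.' ∉ num.toList <;> simp [hdot, hx0] <;> push_cast <;> omega

-- B's loop ignores non-digit characters: it acts like the loop over the filtered list
theorem altLoop_filter (l : List Char) :
    ∀ st, altLoop l st = altLoop (l.filter PySem.Chars.isdigit) st := by
  induction l with
  | nil => intro st; rfl
  | cons x rest ih =>
    intro st
    obtain ⟨started, count, zeros⟩ := st
    by_cases hd : PySem.Chars.isdigit x = true
    · rw [List.filter_cons_of_pos hd]
      simp only [altLoop, hd, if_true]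
      split_ifs <;> exact ih _
    · rw [List.filter_cons_of_neg (by simpa using hd)]
      simp only [altLoop, hd, if_false]
      exact ih _

-- B's loop after the first nonzero digit (started = true), over a digit-only list
theorem altLoop_started (l : List Char) (hdig : ∀ x ∈ l, PySem.Chars.isdigit x = true) :
    ∀ (c z : Int),
    altLoop l (true, c, z) =
      if l.reverse.dropWhile (· == '0') = [] then (true, c, z + (l.length : Int))
      else (true, c + z + ((l.reverse.dropWhile (· == '0')).length : Int),
            (l.length : Int) - ((l.reverse.dropWhile (· == '0')).length : Int)) := by
  induction l with
  | nil => intro c z; simp [altLoop]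
  | cons x rest ih =>
    intro c z
    have hdx : PySem.Chars.isdigit x = true := hdig x (List.mem_cons_self ..)
    have hdr : ∀ y ∈ rest, PySem.Chars.isdigit y = true :=
      fun y hy => hdig y (List.mem_cons_of_mem _ hy)
    simp only [altLoop, hdx, if_true, List.reverse_cons]
    by_cases hx0 : x = '0'
    · subst hx0
      rw [if_neg (by simp), ih hdr c (z + 1)]
      by_cases hrd : rest.reverse.dropWhile (· == '0') = []
      · have hx : (rest.reverse ++ [('0' : Char)]).dropWhile (· == '0') = [] := by
          rw [List.dropWhile_append, hrd]; simp [List.dropWhile]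
        simp only [hrd, hx, if_true, List.length_cons]
        rw [Prod.mk.injEq]; refine ⟨rfl, ?_⟩; push_cast; ring
      · have hx : (rest.reverse ++ [('0' : Char)]).dropWhile (· == '0')
            = rest.reverse.dropWhile (· == '0') ++ [('0' : Char)] := by
          rw [List.dropWhile_append]; simp [List.isEmpty_iff, hrd]
        have hne : rest.reverse.dropWhile (· == '0') ++ [('0' : Char)] ≠ [] := by simp
        simp only [hrd, hx, hne, if_false, List.length_append, List.length_singleton,
          List.length_cons]
        rw [Prod.mk.injEq, Prod.mk.injEq]
        refine ⟨rfl, by simp only [List.length_nil, Nat.cast_zero, List.length_append, List.length_singleton, List.length_cons]; push_cast; ring, by simp only [List.length_nil, Nat.cast_zero]; push_cast; ring⟩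
    · rw [if_pos hx0, ih hdr (c + z + 1) 0]
      by_cases hrd : rest.reverse.dropWhile (· == '0') = []
      · have hx : (rest.reverse ++ [x]).dropWhile (· == '0') = [x] := by
          rw [List.dropWhile_append, hrd]
          simp [List.dropWhile, beq_eq_false_iff_ne.mpr hx0]
        simp only [hrd, hx, if_true, if_neg (by simp : ¬ ([x] = ([] : List Char))),
          List.length_singleton, List.length_cons]
        rw [Prod.mk.injEq, Prod.mk.injEq]
        refine ⟨rfl, by simp only [List.length_nil, Nat.cast_zero, List.length_append, List.length_singleton, List.length_cons]; push_cast; ring, by simp only [List.length_nil, Nat.cast_zero]; push_cast; ring⟩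
      · have hx : (rest.reverse ++ [x]).dropWhile (· == '0')
            = rest.reverse.dropWhile (· == '0') ++ [x] := by
          rw [List.dropWhile_append]; simp [List.isEmpty_iff, hrd]
        have hne : rest.reverse.dropWhile (· == '0') ++ [x] ≠ [] := by simp
        simp only [hrd, hx, hne, if_false, List.length_append, List.length_singleton,
          List.length_cons]
        rw [Prod.mk.injEq, Prod.mk.injEq]
        refine ⟨rfl, by simp only [List.length_nil, Nat.cast_zero, List.length_append, List.length_singleton, List.length_cons]; push_cast; ring, by simp only [List.length_nil, Nat.cast_zero]; push_cast; ring⟩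

-- B's loop from the initial state, over a digit-only list: leading zeros are skipped,
-- then the started-phase runs on the tail after the first nonzero digit
theorem altLoop_start (l : List Char) (hdig : ∀ x ∈ l, PySem.Chars.isdigit x = true) :
    altLoop l (false, 0, 0) =
      if l.dropWhile (· == '0') = [] then (false, 0, 0)
      else (true,
        (((l.dropWhile (· == '0')).reverse.dropWhile (· == '0')).length : Int),
        ((l.dropWhile (· == '0')).length : Int)
          - ((l.dropWhile (· == '0')).reverse.dropWhile (· == '0')).length) := by
  induction l with
  | nil => simp [altLoop]
  | cons x rest ih =>
    have hdx : PySem.Chars.isdigit x = true := hdig x (List.mem_cons_self ..)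
    have hdr : ∀ y ∈ rest, PySem.Chars.isdigit y = true :=
      fun y hy => hdig y (List.mem_cons_of_mem _ hy)
    simp only [altLoop, hdx, if_true]
    by_cases hx0 : x = '0'
    · subst hx0
      rw [if_neg (by simp), if_neg (by simp), ih hdr]
      have hdw : (('0' : Char) :: rest).dropWhile (· == '0') = rest.dropWhile (· == '0') := by
        simp [List.dropWhile]
      rw [hdw]
    · rw [if_pos hx0, altLoop_started rest hdr (0 + 0 + 1) 0]
      have hdw : (x :: rest).dropWhile (· == '0') = x :: rest := by
        simp [List.dropWhile, beq_eq_false_iff_ne.mpr hx0]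
      rw [hdw, if_neg (List.cons_ne_nil x rest), List.reverse_cons]
      by_cases hrd : rest.reverse.dropWhile (· == '0') = []
      · have hx : (rest.reverse ++ [x]).dropWhile (· == '0') = [x] := by
          rw [List.dropWhile_append, hrd]
          simp [List.dropWhile, beq_eq_false_iff_ne.mpr hx0]
        simp only [hrd, hx, if_true]
        rw [Prod.mk.injEq, Prod.mk.injEq]
        refine ⟨rfl, ?_, ?_⟩ <;>
          (simp only [List.length_nil, List.length_append, List.length_singleton,
            List.length_cons]; push_cast; try ring_nf; try omega)
      · have hx : (rest.reverse ++ [x]).dropWhile (· == '0')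
            = rest.reverse.dropWhile (· == '0') ++ [x] := by
          rw [List.dropWhile_append]; simp [List.isEmpty_iff, hrd]
        simp only [hrd, hx, if_false]
        rw [Prod.mk.injEq, Prod.mk.injEq]
        refine ⟨rfl, ?_, ?_⟩ <;>
          (simp only [List.length_nil, List.length_append, List.length_singleton,
            List.length_cons]; push_cast; try ring_nf; try omega)

-- ===== VERDICT (by name: the statement is the Claim_ definition above) =====
theorem sig_figs_spec : Claim_equal_sig_figs := by
  intro num _
  simp only [Spec_sig_figs, sig_figs, sig_figs_alt]
  set s := num.toList.filter PySem.Chars.isdigit with hs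
  have hdig : ∀ x ∈ s, PySem.Chars.isdigit x = true := by
    intro x hx; exact (List.mem_filter.mp hx).2
  rw [sigLoop_search num s 0 ((s.length : Int) - 1) le_rfl hdig,
    altLoop_filter num.toList (false, 0, 0), ← hs, altLoop_start s hdig]
  set d := s.dropWhile (· == '0') with hd
  set rd := s.reverse.dropWhile (· == '0') with hrd
  set m := (d.reverse.dropWhile (· == '0')).length with hm
  have hdlen : d.length ≤ s.length := List.length_dropWhile_le _ _
  have hmlen : m ≤ d.length := by
    calc m ≤ d.reverse.length := List.length_dropWhile_le _ _
      _ = d.length := List.length_reverse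
  have hnil : d = [] ↔ rd = [] := by
    rw [hd, hrd, List.dropWhile_eq_nil_iff, List.dropWhile_eq_nil_iff]
    constructor <;> intro h y hy <;> exact h y (by simpa using hy)
  by_cases hde : d = []
  · -- all digits are zeros: both return 0
    have hre : rd = [] := hnil.mp hde
    simp [hde, hre]
  · by_cases hdot : '.' ∉ num.toList
    · -- integer-form input: A's last tracks the last nonzero; B returns its bare count
      have hre : rd ≠ [] := fun h => hde (hnil.mpr h)
      have hsplit : s.takeWhile (· == '0') ++ d = s := List.takeWhile_append_dropWhile
      have hhead : (d.head hde == '0') = false :=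
        List.head_dropWhile_not (· == '0') hde
      have hdrne : d.reverse.dropWhile (· == '0') ≠ [] := by
        intro h
        have h' : ∀ y ∈ d.reverse, (y == '0') = true := List.dropWhile_eq_nil_iff.mp h
        have hc := h' (d.head hde) (by simp [List.head_mem])
        rw [hhead] at hc; exact Bool.false_ne_true hc
      have hrdval : rd = d.reverse.dropWhile (· == '0')
          ++ (s.takeWhile (· == '0')).reverse := by
        conv_lhs => rw [hrd, ← hsplit]
        rw [List.reverse_append, List.dropWhile_append,
          if_neg (by simpa [List.isEmpty_iff] using hdrne)]
      have hzlen : (s.takeWhile (· == '0')).length = s.length - d.length := by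
        have := congrArg List.length hsplit
        simp at this; omega
      have h1 : rd.length = m + (s.length - d.length) := by
        rw [hrdval]; simp [hzlen, hm]
      simp only [hdot, hde, hre, ne_eq, not_false_eq_true, and_true, true_and, if_true,
        if_false, if_neg (by simpa using hdot)]
      rw [if_neg (by push_cast; omega : ¬ ((0 : Int) + (s.length : Int) - (d.length : Int) < 0))]
      push_cast [h1]
      omega
    · -- '.' present: A's last stays len(s)-1; B returns count + pending zeros = d.length
      simp only [hdot, false_and, if_false, hde, ne_eq, not_false_eq_true, if_true,
        if_pos (by simpa using not_not.mp hdot),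
        if_neg (by omega : ¬ (0 + (s.length : Int) - (d.length : Int) < 0))]
      push_cast
      omega
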